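-- pv_equiv track=rewrite | github.com/ishandutta2007/ProjectEuler-2 | euler/numbers.py | digital_root_consecutive
-- ===== SOURCE A (Python) =====
-- def digital_root_consecutive(n):
--     if n < 10:
--         return
--
--     c = 0
--     while n:
--         c += n % 10
--         n //= 10
--
--     return c
-- ===== SOURCE B (Python) =====
-- def digital_root_consecutive(n):
--     if n < 10:
--         return
--
--     return sum(map(int, str(n)))
-- ===== Notes on version B (the rewrite author's own statement) =====
-- stated objective: idiomatic
-- what changed: Replaces the modulus-and-floor-division digit-peeling loop with summing the integer values of the characters of str(n), traversing the decimal string representation instead of doing arithmetic digit extraction.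
import Mathlib
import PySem

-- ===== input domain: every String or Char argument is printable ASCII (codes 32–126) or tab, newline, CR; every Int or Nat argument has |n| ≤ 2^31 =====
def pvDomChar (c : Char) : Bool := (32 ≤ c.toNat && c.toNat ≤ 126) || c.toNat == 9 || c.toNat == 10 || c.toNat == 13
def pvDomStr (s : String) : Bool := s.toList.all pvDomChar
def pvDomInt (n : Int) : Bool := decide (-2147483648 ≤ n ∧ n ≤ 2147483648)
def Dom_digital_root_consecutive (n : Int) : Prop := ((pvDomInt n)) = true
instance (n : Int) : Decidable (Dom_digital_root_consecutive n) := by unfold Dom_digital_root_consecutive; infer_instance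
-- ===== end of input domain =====

-- B sums the integer values of the characters of str(n) instead of peeling digits off arithmetically; objective: idiomatic.


-- ===== PORT A =====
-- `while n: c += n % 10; n //= 10` as fuel recursion; fuel n.toNat + 1 is enough
-- since the loop is only reached for n ≥ 10 and n strictly decreases each step.
def pyDigitLoop (fuel : Nat) (n c : Int) : Int :=
  match fuel with
  | 0 => c
  | f + 1 =>
      if n ≠ 0 then pyDigitLoop f (PySem.Int.floordiv n 10) (c + PySem.Int.mod n 10)
      else c

def digital_root_consecutive (n : Int) : Option Int :=
  if n < 10 then none
  else some (pyDigitLoop (n.toNat + 1) n 0)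

-- ===== PORT B =====
-- sum(map(int, str(n))); int(d) on a single character ported as ofStr? with
-- default 0 (on the digit characters produced by str(n) it never is none).
def digital_root_consecutive_alt (n : Int) : Option Int :=
  if n < 10 then none
  else some (((PySem.Int.toStr n).toList.map
      (fun ch => (PySem.Int.ofStr? (String.singleton ch)).getD 0)).sum)

-- ===== PRECONDITION & SPEC =====
def Spec_digital_root_consecutive (n : Int) (out : Option Int) : Prop := out = digital_root_consecutive_alt n
instance (n : Int) (out : Option Int) : Decidable (Spec_digital_root_consecutive n out) := by unfold Spec_digital_root_consecutive; infer_instance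

-- ===== CLAIM (what is proved, stated in full; the proofs are below) =====
def Claim_equal_digital_root_consecutive : Prop := ∀ (n : Int), Dom_digital_root_consecutive n → Spec_digital_root_consecutive n (digital_root_consecutive n)

-- ===== LEMMAS AND PROOFS =====

-- digit sum of a natural number
def natSum (k : Nat) : Nat :=
  if h : k = 0 then 0 else k % 10 + natSum (k / 10)
decreasing_by exact Nat.div_lt_self (Nat.pos_of_ne_zero h) (by norm_num)

-- integer value of one character, as B's port computes it
def chVal (ch : Char) : Int := (PySem.Int.ofStr? (String.singleton ch)).getD 0

lemma chVal_digitChar (d : Nat) (hd : d < 10) : chVal (Nat.digitChar d) = (d : Int) := by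
  interval_cases d <;> decide

lemma floordiv_cast (k : Nat) : PySem.Int.floordiv (k : Int) 10 = ((k / 10 : Nat) : Int) := by
  rw [PySem.Int.floordiv, Int.fdiv_eq_ediv_of_nonneg _ (by norm_num)]
  exact_mod_cast rfl

lemma mod_cast' (k : Nat) : PySem.Int.mod (k : Int) 10 = ((k % 10 : Nat) : Int) := by
  rw [PySem.Int.mod, Int.fmod_eq_emod_of_nonneg _ (by norm_num)]
  exact_mod_cast rfl

lemma natSum_ne (k : Nat) (h : k ≠ 0) : natSum k = k % 10 + natSum (k / 10) := by
  rw [natSum, dif_neg h]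

lemma pyDigitLoop_natSum : ∀ (f : Nat) (k : Nat) (c : Int), k < f →
    pyDigitLoop f (k : Int) c = c + (natSum k : Int) := by
  intro f
  induction f with
  | zero => intro k c h; omega
  | succ f ih =>
    intro k c h
    by_cases hk : k = 0
    · subst hk; simp [pyDigitLoop, natSum]
    · have hlt : k / 10 < f :=
        lt_of_lt_of_le (Nat.div_lt_self (Nat.pos_of_ne_zero hk) (by norm_num)) (by omega)
      have : ((k : Int) ≠ 0) := by exact_mod_cast hk
      rw [pyDigitLoop, if_pos this, floordiv_cast, mod_cast', ih _ _ hlt,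
        natSum_ne k hk]
      push_cast
      ring

-- sum of character values over `Nat.toDigitsCore`
lemma charSum_toDigitsCore : ∀ (f : Nat) (k : Nat) (acc : List Char), k < f →
    ((Nat.toDigitsCore 10 f k acc).map chVal).sum
      = (k % 10 : Nat) + (natSum (k / 10) : Int) + (acc.map chVal).sum := by
  intro f
  induction f with
  | zero => intro k acc h; omega
  | succ f ih =>
    intro k acc h
    rw [Nat.toDigitsCore]
    by_cases h0 : k / 10 = 0
    · rw [h0, if_pos rfl]
      simp only [List.map_cons, List.sum_cons,
        chVal_digitChar _ (Nat.mod_lt _ (by norm_num))]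
      rw [natSum]
      push_cast; ring
    · have hlt : k / 10 < f :=
        lt_of_lt_of_le (Nat.div_lt_self (by omega) (by norm_num)) (by omega)
      rw [if_neg h0, ih _ _ hlt]
      simp only [List.map_cons, List.sum_cons,
        chVal_digitChar _ (Nat.mod_lt _ (by norm_num))]
      rw [natSum_ne _ h0]
      push_cast; ring

-- ===== VERDICT (by name: the statement is the Claim_ definition above) =====
theorem digital_root_consecutive_spec : Claim_equal_digital_root_consecutive := by
  intro n _
  unfold Spec_digital_root_consecutive digital_root_consecutive digital_root_consecutive_alt
  by_cases hn : n < 10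
  · simp [hn]
  · rw [if_neg hn, if_neg hn]
    have hpos : (0 : Int) ≤ n := by omega
    have hrep : n = ((n.toNat : Nat) : Int) := by omega
    set m := n.toNat with hm
    have hm10 : 10 ≤ m := by omega
    -- A side
    have hA : pyDigitLoop (m + 1) n 0 = (natSum m : Int) := by
      rw [hrep]
      simpa using pyDigitLoop_natSum (m + 1) m 0 (by omega)
    -- B side
    have hchars : (PySem.Int.toStr n).toList = Nat.toDigits 10 m := by
      rw [PySem.Int.toList_toStr, PySem.Int.toChars, if_neg (by omega)]
    have hB : ((PySem.Int.toStr n).toList.map chVal).sum = (natSum m : Int) := by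
      rw [hchars, Nat.toDigits]
      have := charSum_toDigitsCore (m + 1) m [] (by omega)
      simp only [List.map_nil, List.sum_nil, add_zero] at this
      rw [this, natSum_ne m (by omega)]
      push_cast; ring
    rw [hA]
    exact congrArg some hB.symm
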